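-- pv_equiv track=rewrite | github.com/eliottcassidy2000/math | 04-computation/gk_transfer_matrix_s112.py | fit_degree
-- ===== SOURCE A (Python) =====
-- def fit_degree(values):
--     """Given [(m, g_k(m))], determine the degree of the polynomial.
--     Use forward differences."""
--     if not values:
--         return -1
--     # Need consecutive m values starting from some m0
--     ms = [m for m, _ in values]
--     vs = [v for _, v in values]
--
--     # Forward differences
--     diffs = list(vs)
--     degree = 0
--     for d in range(1, len(diffs)):
--         new_diffs = [diffs[i+1] - diffs[i] for i in range(len(diffs)-1)]
--         if all(v == 0 for v in new_diffs):
--             break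
--         degree = d
--         diffs = new_diffs
--
--     return degree
-- ===== SOURCE B (Python) =====
-- def fit_degree(values):
--     if not values:
--         return -1
--     vs = [v for _, v in values]
--
--     def deg(xs):
--         if len(xs) < 2:
--             return 0
--         d = [b - a for a, b in zip(xs, xs[1:])]
--         if all(v == 0 for v in d):
--             return 0
--         return 1 + deg(d)
--
--     return deg(vs)
-- ===== Notes on version B (the rewrite author's own statement) =====
-- stated objective: simpler
-- what changed: A's explicit loop over range(1, len(diffs)) with a running degree counter, mutable diffs and a break is replaced by a recursive helper deg(xs) that returns 0 for lists shorter than 2 or with all-zero first differences, and otherwise 1 + deg of the difference list.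
import Mathlib
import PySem

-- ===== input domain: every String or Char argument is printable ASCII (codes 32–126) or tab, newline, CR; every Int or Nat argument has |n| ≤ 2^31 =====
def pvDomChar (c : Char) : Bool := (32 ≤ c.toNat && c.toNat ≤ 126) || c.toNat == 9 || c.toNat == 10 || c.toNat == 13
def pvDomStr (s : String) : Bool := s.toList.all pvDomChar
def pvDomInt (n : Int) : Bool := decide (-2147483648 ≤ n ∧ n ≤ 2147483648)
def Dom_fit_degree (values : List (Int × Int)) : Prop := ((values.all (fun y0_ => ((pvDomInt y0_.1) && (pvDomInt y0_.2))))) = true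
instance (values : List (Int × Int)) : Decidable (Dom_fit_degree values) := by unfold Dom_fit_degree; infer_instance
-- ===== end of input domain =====

-- B replaces A's iterative difference-triangle loop (running `degree` counter, `break`) with a
-- recursive definition of the degree over the successive difference lists (objective: simpler).

-- ===== PORT A =====
-- new_diffs = [diffs[i+1] - diffs[i] for i in range(len(diffs)-1)]  (indices always in range)
def pvNewDiffs (diffs : List Int) : List Int :=
  (PySem.List.pyRange 0 (PySem.List.len diffs - 1) 1).map
    (fun i => PySem.List.pyGetD diffs (i + 1) 0 - PySem.List.pyGetD diffs i 0)

-- the `for d in range(1, len(diffs))` loop with its break, state (diffs, degree)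
def pvLoopA : List Int → List Int → Int → Int
  | [], _, degree => degree
  | d :: ds, diffs, degree =>
      let new_diffs := pvNewDiffs diffs
      if new_diffs.all (fun v => v == 0) then degree
      else pvLoopA ds new_diffs d

def fit_degree (values : List (Int × Int)) : Int :=
  if values = [] then -1
  else
    let _ms := values.map (fun p => p.1)   -- dead variable in A, kept
    let vs := values.map (fun p => p.2)
    let diffs := vs
    pvLoopA (PySem.List.pyRange 1 (PySem.List.len diffs) 1) diffs 0

-- ===== PORT B =====
-- xs[1:] = xs.drop 1 (cited by pvDeg's termination proof, so it stays above the port)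
theorem pvSlice1 (xs : List Int) : PySem.List.slice xs (some 1) none = xs.drop 1 := by
  exact_mod_cast PySem.List.slice_from_natCast xs 1

def pvDeg (xs : List Int) : Int :=
  if xs.length < 2 then 0
  else
    let d := (xs.zip (PySem.List.slice xs (some 1) none)).map (fun p => p.2 - p.1)
    if d.all (fun v => v == 0) then 0 else 1 + pvDeg d
termination_by xs.length
decreasing_by
  simp only [List.length_map, List.length_zip, pvSlice1, List.length_drop]
  omega

def fit_degree_alt (values : List (Int × Int)) : Int :=
  if values = [] then -1
  else pvDeg (values.map (fun p => p.2))

-- ===== PRECONDITION & SPEC =====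
def Spec_fit_degree (values : List (Int × Int)) (out : Int) : Prop := out = fit_degree_alt values
instance (values : List (Int × Int)) (out : Int) : Decidable (Spec_fit_degree values out) := by unfold Spec_fit_degree; infer_instance

-- ===== CLAIM (what is proved, stated in full; the proofs are below) =====
def Claim_equal_fit_degree : Prop := ∀ (values : List (Int × Int)), Dom_fit_degree values → Spec_fit_degree values (fit_degree values)

-- ===== LEMMAS AND PROOFS =====

-- A's comprehension over indices equals B's zip-of-adjacent-pairs form
theorem pvNewDiffs_eq (xs : List Int) :
    pvNewDiffs xs = (xs.zip (PySem.List.slice xs (some 1) none)).map (fun p => p.2 - p.1) := by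
  rw [pvSlice1]
  unfold pvNewDiffs
  cases xs with
  | nil => simp [PySem.List.len_eq, PySem.List.pyRange_one_eq_nil]
  | cons x rest =>
    apply List.ext_getElem
    · simp [PySem.List.len_eq, PySem.List.length_pyRange_one]
    · intro k h1 h2
      have hk : k < rest.length := by
        simpa [PySem.List.len_eq, PySem.List.length_pyRange_one] using h1
      have hk1 : k + 1 < (x :: rest).length := by simp; omega
      simp only [List.getElem_map, PySem.List.getElem_pyRange_one, List.getElem_zip,
        List.getElem_drop]
      have e1 : PySem.List.pyGetD (x :: rest) ((0:Int) + (k:Int) + 1) 0 = (x :: rest)[k+1] := by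
        rw [show (0:Int) + (k:Int) + 1 = ((k+1 : Nat) : Int) by omega,
          PySem.List.pyGetD_natCast, List.getD_eq_getElem _ _ hk1]
      have e2 : PySem.List.pyGetD (x :: rest) ((0:Int) + (k:Int)) 0 = (x :: rest)[k] := by
        rw [show (0:Int) + (k:Int) = ((k : Nat) : Int) by omega,
          PySem.List.pyGetD_natCast, List.getD_eq_getElem]
      rw [e1, e2]
      simp [Nat.add_comm]

-- loop invariant: with remaining range (k+1 .. k + |xs|) and current degree k,
-- A's loop returns k plus B's recursive degree of xs
theorem pvLoop_eq (n : Nat) : ∀ (xs : List Int), xs.length ≤ n → ∀ (k : Int),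
    pvLoopA (PySem.List.pyRange (k + 1) (k + xs.length) 1) xs k = k + pvDeg xs := by
  induction n with
  | zero =>
    intro xs hle k
    have h0 : xs.length = 0 := by omega
    rw [PySem.List.pyRange_one_eq_nil (by omega), pvLoopA, pvDeg]
    simp [h0]
  | succ n ih =>
    intro xs hle k
    by_cases hsmall : xs.length < 2
    · rw [PySem.List.pyRange_one_eq_nil (by omega), pvLoopA, pvDeg]
      simp [hsmall]
    · have hlen : 2 ≤ xs.length := by omega
      rw [PySem.List.pyRange_one_cons (by omega)]
      rw [pvLoopA]
      set nd := pvNewDiffs xs with hnd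
      have hndlen : nd.length = xs.length - 1 := by
        simp [hnd, pvNewDiffs_eq, pvSlice1]
      rw [pvDeg]
      simp only [if_neg (by omega : ¬ xs.length < 2)]
      rw [← pvNewDiffs_eq]
      by_cases hz : (nd.all fun v => v == 0) = true
      · rw [if_pos hz, if_pos hz]; ring
      · rw [if_neg hz, if_neg hz]
        have : pvLoopA (PySem.List.pyRange (k + 1 + 1) (k + 1 + nd.length) 1) nd (k + 1)
            = (k + 1) + pvDeg nd := ih nd (by omega) (k + 1)
        have harg : (k + 1 + (nd.length : Int)) = k + (xs.length : Int) := by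
          rw [hndlen]; push_cast [Nat.cast_sub (by omega : 1 ≤ xs.length)]; ring
        rw [harg] at this
        rw [this]
        ring

-- ===== VERDICT (by name: the statement is the Claim_ definition above) =====
theorem fit_degree_spec : Claim_equal_fit_degree := by
  intro values _
  unfold Spec_fit_degree fit_degree fit_degree_alt
  by_cases h : values = []
  · simp [h]
  · simp only [h, if_false]
    have := pvLoop_eq (values.map (fun p => p.2)).length (values.map (fun p => p.2)) le_rfl 0
    simpa [PySem.List.len_eq] using this
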